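-- pv_equiv track=rewrite | github.com/Tokyo113/leetcode_python | 中级班/chapter1/code_02_AppleMinBags.py | minBags
-- ===== SOURCE A (Python) =====
-- def minBags(n):
--     '''
--     先写出笨方法，打印出来结果总结数学规律
--     :param n:
--     :return:
--     '''
--     if n <= 0 or n%2 != 0:
--         return -1
--
--     bags8 = n // 8
--     restApple = n - 8*bags8
--     bags6 = -1
--
--     while restApple >= 0 and restApple < 24:
--         if restApple % 6 == 0:
--             bags6 = restApple // 6
--             break
--         if bags8 == 0:
--             break
--         bags8 -= 1
--         restApple = n-8*bags8
--
--
--     return bags8+bags6 if bags6 != -1 else -1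
-- ===== SOURCE B (Python) =====
-- def minBags(n):
--     # closed form: invalid inputs -> -1, otherwise ceil(n/8) bags
--     if n <= 0 or n % 2 != 0 or n in (2, 4, 10):
--         return -1
--     return (n + 7) // 8
-- ===== Notes on version B (the rewrite author's own statement) =====
-- stated objective: simpler
-- what changed: Replaced the bounded greedy while-loop (maximizing 8-bags and decrementing until the remainder is divisible by 6) with a guard for the invalid inputs (n<=0, odd n, and the three unrepresentable even values 2, 4, 10) followed by the closed form (n+7)//8.
import Mathlib
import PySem

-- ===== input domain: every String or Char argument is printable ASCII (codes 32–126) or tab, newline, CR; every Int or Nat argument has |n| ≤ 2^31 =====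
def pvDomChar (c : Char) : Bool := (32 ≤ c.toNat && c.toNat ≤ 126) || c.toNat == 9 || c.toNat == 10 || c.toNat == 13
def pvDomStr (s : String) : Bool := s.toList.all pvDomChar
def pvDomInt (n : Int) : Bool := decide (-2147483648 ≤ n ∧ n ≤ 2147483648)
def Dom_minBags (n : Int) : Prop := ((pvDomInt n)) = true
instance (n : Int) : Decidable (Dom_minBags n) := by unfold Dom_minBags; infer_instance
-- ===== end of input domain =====

-- B replaces A's greedy decrement loop by guards for the invalid inputs plus the closed form (n+7)//8 ("simpler").

-- ===== PORT A =====
-- the while loop; fuel bags8.toNat + 4 always suffices: restApple grows by 8 per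
-- iteration from a value ≥ 0 and the loop exits once restApple ≥ 24, so at most 3 iterations run
def minBagsLoop (n : Int) : Int → Int → Int → Nat → Int × Int
  | bags8, _, bags6, 0 => (bags8, bags6)
  | bags8, restApple, bags6, fuel+1 =>
    if restApple ≥ 0 ∧ restApple < 24 then
      if PySem.Int.mod restApple 6 = 0 then (bags8, PySem.Int.floordiv restApple 6)
      else if bags8 = 0 then (bags8, bags6)
      else minBagsLoop n (bags8 - 1) (n - 8*(bags8 - 1)) bags6 fuel
    else (bags8, bags6)

def minBags (n : Int) : Int :=
  if n ≤ 0 ∨ PySem.Int.mod n 2 ≠ 0 then -1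
  else
    let bags8 := PySem.Int.floordiv n 8
    let restApple := n - 8*bags8
    let bags6 : Int := -1
    let r := minBagsLoop n bags8 restApple bags6 (bags8.toNat + 4)
    if r.2 ≠ -1 then r.1 + r.2 else -1

-- ===== PORT B =====
def minBags_alt (n : Int) : Int :=
  if n ≤ 0 ∨ PySem.Int.mod n 2 ≠ 0 ∨ n = 2 ∨ n = 4 ∨ n = 10 then -1
  else PySem.Int.floordiv (n + 7) 8

-- ===== PRECONDITION & SPEC =====
def Spec_minBags (n : Int) (out : Int) : Prop := out = minBags_alt n
instance (n : Int) (out : Int) : Decidable (Spec_minBags n out) := by unfold Spec_minBags; infer_instance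

-- ===== CLAIM (what is proved, stated in full; the proofs are below) =====
def Claim_equal_minBags : Prop := ∀ (n : Int), Dom_minBags n → Spec_minBags n (minBags n)

-- ===== LEMMAS AND PROOFS =====


-- one-step unfolding of the while loop (fuel successor case)
theorem minBagsLoop_succ (n bags8 restApple bags6 : Int) (fuel : Nat) :
    minBagsLoop n bags8 restApple bags6 (fuel+1) =
      if restApple ≥ 0 ∧ restApple < 24 then
        if PySem.Int.mod restApple 6 = 0 then (bags8, PySem.Int.floordiv restApple 6)
        else if bags8 = 0 then (bags8, bags6)
        else minBagsLoop n (bags8 - 1) (n - 8*(bags8 - 1)) bags6 fuel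
      else (bags8, bags6) := rfl

-- ===== VERDICT (by name: the statement is the Claim_ definition above) =====
theorem minBags_spec : Claim_equal_minBags := by
  intro n _
  unfold Spec_minBags minBags minBags_alt
  simp only [PySem.Int.mod_eq_emod_of_pos (by norm_num : (0:Int) < 2)]
  by_cases hv : n ≤ 0 ∨ n % 2 ≠ 0
  · rw [if_pos hv, if_pos (by tauto)]
  · push Not at hv
    obtain ⟨hn, h2⟩ := hv
    rw [if_neg (show ¬(n ≤ 0 ∨ n % 2 ≠ 0) from by omega)]
    simp only [PySem.Int.floordiv_eq_ediv_of_pos (by norm_num : (0:Int) < 8)]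
    have h8 : n % 8 = 0 ∨ n % 8 = 2 ∨ n % 8 = 4 ∨ n % 8 = 6 := by omega
    have hfuel : (n/8).toNat + 4 = ((n/8).toNat + 3) + 1 := rfl
    rcases h8 with h8 | h8 | h8 | h8
    · -- n % 8 = 0 : first check succeeds, bags6 = 0
      have hl : minBagsLoop n (n/8) (n - 8*(n/8)) (-1) ((n/8).toNat + 4) = (n/8, 0) := by
        rw [show n - 8*(n/8) = 0 from by omega, hfuel, minBagsLoop_succ,
            if_pos (by norm_num : (0:Int) ≥ 0 ∧ (0:Int) < 24),
            if_pos (show PySem.Int.mod 0 6 = 0 from rfl),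
            show PySem.Int.floordiv 0 6 = 0 from rfl]
      rw [hl, if_pos (by norm_num : ((n/8 : Int), (0:Int)).2 ≠ -1),
          if_neg (show ¬(n ≤ 0 ∨ n % 2 ≠ 0 ∨ n = 2 ∨ n = 4 ∨ n = 10) from by omega)]
      show n/8 + 0 = (n + 7)/8
      omega
    · -- n % 8 = 2 : either n = 2 (bags8 = 0), n = 10, or two decrements reach rest 18
      by_cases hb : n / 8 = 0
      · -- n = 2
        have hl : minBagsLoop n (n/8) (n - 8*(n/8)) (-1) ((n/8).toNat + 4) = (n/8, -1) := by
          rw [show n - 8*(n/8) = 2 from by omega, hfuel, minBagsLoop_succ,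
              if_pos (by norm_num : (2:Int) ≥ 0 ∧ (2:Int) < 24),
              if_neg (show ¬PySem.Int.mod 2 6 = 0 from by decide), if_pos hb]
        rw [hl, if_neg (by norm_num : ¬((n/8 : Int), (-1:Int)).2 ≠ -1), if_pos (by omega)]
      · by_cases hb1 : n / 8 - 1 = 0
        · -- n = 10
          have hl : minBagsLoop n (n/8) (n - 8*(n/8)) (-1) ((n/8).toNat + 4) = (n/8 - 1, -1) := by
            rw [show n - 8*(n/8) = 2 from by omega, hfuel, minBagsLoop_succ,
                if_pos (by norm_num : (2:Int) ≥ 0 ∧ (2:Int) < 24),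
                if_neg (show ¬PySem.Int.mod 2 6 = 0 from by decide), if_neg hb,
                show ((n/8).toNat + 3) = ((n/8).toNat + 2) + 1 from rfl, minBagsLoop_succ,
                show n - 8*(n/8 - 1) = 10 from by omega,
                if_pos (by norm_num : (10:Int) ≥ 0 ∧ (10:Int) < 24),
                if_neg (show ¬PySem.Int.mod 10 6 = 0 from by decide), if_pos hb1]
          rw [hl, if_neg (by norm_num : ¬((n/8 - 1 : Int), (-1:Int)).2 ≠ -1), if_pos (by omega)]
        · -- n ≥ 18 : two decrements, rest 18, bags6 = 3
          have hl : minBagsLoop n (n/8) (n - 8*(n/8)) (-1) ((n/8).toNat + 4) = (n/8 - 1 - 1, 3) := by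
            rw [show n - 8*(n/8) = 2 from by omega, hfuel, minBagsLoop_succ,
                if_pos (by norm_num : (2:Int) ≥ 0 ∧ (2:Int) < 24),
                if_neg (show ¬PySem.Int.mod 2 6 = 0 from by decide), if_neg hb,
                show ((n/8).toNat + 3) = ((n/8).toNat + 2) + 1 from rfl, minBagsLoop_succ,
                show n - 8*(n/8 - 1) = 10 from by omega,
                if_pos (by norm_num : (10:Int) ≥ 0 ∧ (10:Int) < 24),
                if_neg (show ¬PySem.Int.mod 10 6 = 0 from by decide), if_neg hb1,
                show ((n/8).toNat + 2) = ((n/8).toNat + 1) + 1 from rfl, minBagsLoop_succ,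
                show n - 8*(n/8 - 1 - 1) = 18 from by omega,
                if_pos (by norm_num : (18:Int) ≥ 0 ∧ (18:Int) < 24),
                if_pos (show PySem.Int.mod 18 6 = 0 from by decide),
                show PySem.Int.floordiv 18 6 = 3 from rfl]
          rw [hl, if_pos (by norm_num : ((n/8 - 1 - 1 : Int), (3:Int)).2 ≠ -1),
              if_neg (show ¬(n ≤ 0 ∨ n % 2 ≠ 0 ∨ n = 2 ∨ n = 4 ∨ n = 10) from by omega)]
          show n/8 - 1 - 1 + 3 = (n + 7)/8
          omega
    · -- n % 8 = 4 : either n = 4 (bags8 = 0) or one decrement reaches rest 12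
      by_cases hb : n / 8 = 0
      · -- n = 4
        have hl : minBagsLoop n (n/8) (n - 8*(n/8)) (-1) ((n/8).toNat + 4) = (n/8, -1) := by
          rw [show n - 8*(n/8) = 4 from by omega, hfuel, minBagsLoop_succ,
              if_pos (by norm_num : (4:Int) ≥ 0 ∧ (4:Int) < 24),
              if_neg (show ¬PySem.Int.mod 4 6 = 0 from by decide), if_pos hb]
        rw [hl, if_neg (by norm_num : ¬((n/8 : Int), (-1:Int)).2 ≠ -1), if_pos (by omega)]
      · -- n ≥ 12 : one decrement, rest 12, bags6 = 2
        have hl : minBagsLoop n (n/8) (n - 8*(n/8)) (-1) ((n/8).toNat + 4) = (n/8 - 1, 2) := by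
          rw [show n - 8*(n/8) = 4 from by omega, hfuel, minBagsLoop_succ,
              if_pos (by norm_num : (4:Int) ≥ 0 ∧ (4:Int) < 24),
              if_neg (show ¬PySem.Int.mod 4 6 = 0 from by decide), if_neg hb,
              show ((n/8).toNat + 3) = ((n/8).toNat + 2) + 1 from rfl, minBagsLoop_succ,
              show n - 8*(n/8 - 1) = 12 from by omega,
              if_pos (by norm_num : (12:Int) ≥ 0 ∧ (12:Int) < 24),
              if_pos (show PySem.Int.mod 12 6 = 0 from by decide),
              show PySem.Int.floordiv 12 6 = 2 from rfl]
        rw [hl, if_pos (by norm_num : ((n/8 - 1 : Int), (2:Int)).2 ≠ -1),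
            if_neg (show ¬(n ≤ 0 ∨ n % 2 ≠ 0 ∨ n = 2 ∨ n = 4 ∨ n = 10) from by omega)]
        show n/8 - 1 + 2 = (n + 7)/8
        omega
    · -- n % 8 = 6 : first check succeeds, bags6 = 1
      have hl : minBagsLoop n (n/8) (n - 8*(n/8)) (-1) ((n/8).toNat + 4) = (n/8, 1) := by
        rw [show n - 8*(n/8) = 6 from by omega, hfuel, minBagsLoop_succ,
            if_pos (by norm_num : (6:Int) ≥ 0 ∧ (6:Int) < 24),
            if_pos (show PySem.Int.mod 6 6 = 0 from by decide),
            show PySem.Int.floordiv 6 6 = 1 from rfl]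
      rw [hl, if_pos (by norm_num : ((n/8 : Int), (1:Int)).2 ≠ -1),
          if_neg (show ¬(n ≤ 0 ∨ n % 2 ≠ 0 ∨ n = 2 ∨ n = 4 ∨ n = 10) from by omega)]
      show n/8 + 1 = (n + 7)/8
      omega
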